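-- pv_equiv track=rewrite | github.com/kamyu104/LeetCode-Solutions | Python/equal-score-substrings.py | scoreBalance
-- ===== SOURCE A (Python) =====
-- def scoreBalance(s):
--     """
--     :type s: str
--     :rtype: bool
--     """
--     total = sum(ord(x)-ord('a')+1 for x in s)
--     prefix = 0
--     for x in s:
--         prefix += ord(x)-ord('a')+1
--         if prefix == total-prefix:
--             return True
--     return False
-- ===== SOURCE B (Python) =====
-- def scoreBalance(s):
--     total = 0
--     prefixes = set()
--     for x in s:
--         total += ord(x) - ord('a') + 1
--         prefixes.add(total)
--     return total % 2 == 0 and total // 2 in prefixes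
-- ===== Notes on version B (the rewrite author's own statement) =====
-- stated objective: alternative
-- what changed: Replaces the scan-with-early-return comparing prefix == total-prefix against a precomputed total with a single pass that builds the set of all running prefix sums, answering by a parity guard plus one membership test total//2 in the set.
import Mathlib
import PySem

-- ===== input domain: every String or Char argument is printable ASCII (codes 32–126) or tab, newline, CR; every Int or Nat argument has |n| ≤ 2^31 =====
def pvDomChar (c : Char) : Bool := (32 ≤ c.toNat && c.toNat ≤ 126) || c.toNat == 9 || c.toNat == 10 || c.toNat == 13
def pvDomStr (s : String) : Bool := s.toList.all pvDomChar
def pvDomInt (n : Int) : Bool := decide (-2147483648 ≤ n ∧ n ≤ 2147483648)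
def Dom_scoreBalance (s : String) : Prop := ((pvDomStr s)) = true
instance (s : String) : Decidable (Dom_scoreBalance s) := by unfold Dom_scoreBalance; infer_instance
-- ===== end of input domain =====

-- B builds the set of all running prefix sums in one pass and answers with a parity
-- guard plus one membership test, instead of A's early-return scan against a precomputed total.


-- ===== PORT A =====
-- ord(x) - ord('a') + 1
def pvVal (c : Char) : Int := (c.toNat : Int) - 97 + 1

-- the for-loop with early return: prefix accumulator, total fixed
def pvLoopA (total : Int) : List Char → Int → Bool
  | [], _ => false
  | c :: cs, pre =>
      let p := pre + pvVal c
      if p = total - p then true else pvLoopA total cs p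

def scoreBalance (s : String) : Bool :=
  let total := (s.toList.map pvVal).sum
  pvLoopA total s.toList 0

-- ===== PORT B =====
-- one pass: running total and the set of all prefix sums
def pvLoopB : List Char → Int → PySem.Set Int → Int × PySem.Set Int
  | [], t, ps => (t, ps)
  | c :: cs, t, ps => pvLoopB cs (t + pvVal c) (PySem.Set.add ps (t + pvVal c))

def scoreBalance_alt (s : String) : Bool :=
  let r := pvLoopB s.toList 0 PySem.Set.empty
  decide (PySem.Int.mod r.1 2 = 0) && PySem.Set.contains r.2 (PySem.Int.floordiv r.1 2)

-- ===== PRECONDITION & SPEC =====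
def Spec_scoreBalance (s : String) (out : Bool) : Prop := out = scoreBalance_alt s
instance (s : String) (out : Bool) : Decidable (Spec_scoreBalance s out) := by unfold Spec_scoreBalance; infer_instance

-- ===== CLAIM (what is proved, stated in full; the proofs are below) =====
def Claim_equal_scoreBalance : Prop := ∀ (s : String), Dom_scoreBalance s → Spec_scoreBalance s (scoreBalance s)

-- ===== LEMMAS AND PROOFS =====

-- the list of running prefix sums starting from accumulator t
def pvPrefs (t : Int) : List Char → List Int
  | [] => []
  | c :: cs => (t + pvVal c) :: pvPrefs (t + pvVal c) cs

theorem pvLoopB_fst (cs : List Char) (t : Int) (ps : PySem.Set Int) :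
    (pvLoopB cs t ps).1 = t + (cs.map pvVal).sum := by
  induction cs generalizing t ps with
  | nil => simp [pvLoopB]
  | cons c cs ih => simp [pvLoopB, ih]; ring

theorem pvLoopB_mem (cs : List Char) (t : Int) (ps : PySem.Set Int) (x : Int) :
    x ∈ (pvLoopB cs t ps).2 ↔ x ∈ ps ∨ x ∈ pvPrefs t cs := by
  induction cs generalizing t ps with
  | nil => simp [pvLoopB, pvPrefs]
  | cons c cs ih =>
      simp [pvLoopB, pvPrefs, ih, PySem.Set.mem_add]
      tauto

theorem pvLoopA_iff (total : Int) (cs : List Char) (pre : Int) :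
    pvLoopA total cs pre = true ↔ ∃ p ∈ pvPrefs pre cs, p = total - p := by
  induction cs generalizing pre with
  | nil => simp [pvLoopA, pvPrefs]
  | cons c cs ih =>
      simp only [pvLoopA, pvPrefs, List.mem_cons]
      split_ifs with h
      · simp only [true_iff]
        exact ⟨_, Or.inl rfl, h⟩
      · simp only [ih]
        constructor
        · rintro ⟨p, hp, he⟩; exact ⟨p, Or.inr hp, he⟩
        · rintro ⟨p, hp | hp, he⟩
          · exact absurd (hp ▸ he) h
          · exact ⟨p, hp, he⟩

theorem scoreBalance_eq (s : String) : scoreBalance s = scoreBalance_alt s := by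
  rw [Bool.eq_iff_iff]
  unfold scoreBalance scoreBalance_alt
  simp only [pvLoopA_iff, Bool.and_eq_true, decide_eq_true_eq,
    PySem.Set.contains_iff, pvLoopB_mem, pvLoopB_fst]
  have hz : ¬ ((PySem.Int.floordiv (0 + (s.toList.map pvVal).sum) 2) ∈ PySem.Set.empty) := by
    simp [PySem.Set.empty]
  set T : Int := (s.toList.map pvVal).sum with hT
  have h2 : (0:Int) < 2 := by norm_num
  rw [PySem.Int.mod_eq_emod_of_pos h2, PySem.Int.floordiv_eq_ediv_of_pos h2]
  constructor
  · rintro ⟨p, hp, he⟩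
    have hTp : T = 2 * p := by omega
    refine ⟨by omega, Or.inr ?_⟩
    have h5 : (0 + T) / 2 = p := by omega
    rw [h5]; exact hp
  · rintro ⟨hm, hmem | hmem⟩
    · exact absurd hmem (by simp [PySem.Set.empty])
    · refine ⟨(0 + T) / 2, hmem, ?_⟩
      omega

-- ===== VERDICT (by name: the statement is the Claim_ definition above) =====
theorem scoreBalance_spec : Claim_equal_scoreBalance := by
  intro s _
  exact scoreBalance_eq s
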